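-- pv_equiv track=rewrite | github.com/jakel/DemoApp | DemoApp/fleets.py | _get_lowest_fleet_num
-- ===== SOURCE A (Python) =====
-- MAX_FLEET_NUM = 10
--
-- def _get_lowest_fleet_num(fleets=[]):
--     for x in range(MAX_FLEET_NUM):
--         ret = x + 1
--         is_in = False
--         for fleet in fleets:
--             if fleet['fleet_num'] == ret:
--                 is_in = True
--         if not is_in:
--             return ret
--     return 0 # return bad fleet num
-- ===== SOURCE B (Python) =====
-- MAX_FLEET_NUM = 10
--
-- def _get_lowest_fleet_num(fleets=[]):
--     used = {f['fleet_num'] for f in fleets}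
--     avail = set(range(1, MAX_FLEET_NUM + 1)) - used
--     return min(avail) if avail else 0
-- ===== Notes on version B (the rewrite author's own statement) =====
-- stated objective: simpler
-- what changed: Replaces the nested scan (one full pass over fleets per candidate 1..10) by building the set of used numbers once, taking the set difference with {1..10} and returning its minimum (0 if empty).
import Mathlib
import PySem

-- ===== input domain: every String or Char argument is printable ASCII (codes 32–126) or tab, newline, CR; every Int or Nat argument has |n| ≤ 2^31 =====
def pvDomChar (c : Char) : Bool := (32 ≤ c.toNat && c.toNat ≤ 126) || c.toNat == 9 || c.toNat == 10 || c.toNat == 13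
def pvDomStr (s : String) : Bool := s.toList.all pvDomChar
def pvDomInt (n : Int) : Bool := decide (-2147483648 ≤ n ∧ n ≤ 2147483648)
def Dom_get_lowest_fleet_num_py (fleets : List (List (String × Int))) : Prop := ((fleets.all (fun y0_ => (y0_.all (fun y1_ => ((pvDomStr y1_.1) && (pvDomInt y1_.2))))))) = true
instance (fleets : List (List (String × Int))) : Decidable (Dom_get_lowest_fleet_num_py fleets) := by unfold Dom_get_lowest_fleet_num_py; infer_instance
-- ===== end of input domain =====

-- B builds the set of used fleet numbers once and returns min({1..10} - used) (0 if empty),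
-- instead of A's rescan of the whole fleet list for each candidate: simpler, one pass.


-- ===== PORT A =====
-- fleet['fleet_num'] — dict lookup = first match in the association list; total form,
-- exact under Pre_ (which requires the key to be present).
def pvFleetNum (fleet : List (String × Int)) : Int :=
  ((fleet.find? (fun p => p.1 == "fleet_num")).map Prod.snd).getD 0

-- the 'for x in range(MAX_FLEET_NUM)' loop with its early return
def pvALoop (fleets : List (List (String × Int))) : List Int → Int
  | [] => 0                                  -- loop exhausted: return 0 (bad fleet num)
  | x :: rest =>
    let ret := x + 1
    let is_in := fleets.foldl (fun b fleet => if pvFleetNum fleet == ret then true else b) false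
    if !is_in then ret else pvALoop fleets rest

def get_lowest_fleet_num_py (fleets : List (List (String × Int))) : Int :=
  pvALoop fleets (PySem.List.pyRange 0 10 1)

-- ===== PORT B =====
def get_lowest_fleet_num_py_alt (fleets : List (List (String × Int))) : Int :=
  let used : PySem.Set Int := PySem.Set.ofList (fleets.map pvFleetNum)
  let avail : PySem.Set Int := PySem.Set.diff (PySem.Set.ofList (PySem.List.pyRange 1 11 1)) used
  match PySem.List.min? avail (fun y => y) with   -- min(avail) if avail else 0
  | some m => m
  | none => 0

-- ===== PRECONDITION & SPEC =====
-- Pre_ excludes exactly the inputs where A raises KeyError: some fleet dict lacks the key 'fleet_num'.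
def Pre_get_lowest_fleet_num_py (fleets : List (List (String × Int))) : Prop :=
  (fleets.all (fun fleet => fleet.any (fun p => p.1 == "fleet_num"))) = true
instance (fleets : List (List (String × Int))) : Decidable (Pre_get_lowest_fleet_num_py fleets) := by unfold Pre_get_lowest_fleet_num_py; infer_instance
def pvWitness_get_lowest_fleet_num_py : (List (List (String × Int))) := [[("fleet_num", 1)], [("fleet_num", 3)]]

def Spec_get_lowest_fleet_num_py (fleets : List (List (String × Int))) (out : Int) : Prop := out = get_lowest_fleet_num_py_alt fleets
instance (fleets : List (List (String × Int))) (out : Int) : Decidable (Spec_get_lowest_fleet_num_py fleets out) := by unfold Spec_get_lowest_fleet_num_py; infer_instance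

-- ===== CLAIM (what is proved, stated in full; the proofs are below) =====
def Claim_equal_get_lowest_fleet_num_py : Prop := ∀ (fleets : List (List (String × Int))), Dom_get_lowest_fleet_num_py fleets → Pre_get_lowest_fleet_num_py fleets → Spec_get_lowest_fleet_num_py fleets (get_lowest_fleet_num_py fleets)

-- ===== LEMMAS AND PROOFS =====

-- A's inner loop (no break) computes membership of ret in the list of fleet numbers
theorem pv_fold_isin (fleets : List (List (String × Int))) (ret : Int) (b : Bool) :
    fleets.foldl (fun b fleet => if pvFleetNum fleet == ret then true else b) b
      = (b || (fleets.map pvFleetNum).contains ret) := by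
  induction fleets generalizing b with
  | nil => simp
  | cons f t ih =>
    simp only [List.foldl_cons, ih, List.map_cons, List.contains_cons]
    by_cases h : pvFleetNum f = ret
    · subst h; cases b <;> simp
    · have h2 : (ret == pvFleetNum f) = false := beq_eq_false_iff_ne.mpr (Ne.symm h)
      simp [h, h2]

-- A's outer loop returns the first candidate x+1 not in `used`, i.e. the head of the filtered list
theorem pv_aLoop_eq (fleets : List (List (String × Int))) (l : List Int) :
    pvALoop fleets l
      = (match ((l.map (· + 1)).filter
            (fun r => !((fleets.map pvFleetNum).contains r))).head? with
         | some m => m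
         | none => 0) := by
  induction l with
  | nil => simp [pvALoop]
  | cons x rest ih =>
    simp only [pvALoop, pv_fold_isin, Bool.false_or, List.map_cons, List.filter_cons]
    by_cases hc : (x + 1) ∈ fleets.map pvFleetNum
    · simp [hc, ih]
    · simp [hc]

-- min? with the identity key on a sorted (strictly ascending) list is its head
theorem pv_foldl_min_of_le (t : List Int) (x : Int) (h : ∀ y ∈ t, x ≤ y) :
    t.foldl min x = x := by
  induction t with
  | nil => rfl
  | cons y ys ih =>
    simp only [List.foldl_cons]
    rw [min_eq_left (h y (by simp))]
    exact ih (fun z hz => h z (by simp [hz]))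

theorem pv_min?_sorted (l : List Int) (hs : l.Pairwise (· < ·)) :
    (match PySem.List.min? l (fun y => y) with | some m => m | none => 0)
      = (match l.head? with | some m => m | none => (0 : Int)) := by
  cases l with
  | nil => rfl
  | cons x t =>
    rw [PySem.List.min?_id_cons]
    simp only [List.head?_cons]
    exact pv_foldl_min_of_le t x (fun y hy => le_of_lt ((List.pairwise_cons.mp hs).1 y hy))

-- ===== VERDICT (by name: the statement is the Claim_ definition above) =====
theorem get_lowest_fleet_num_py_spec : Claim_equal_get_lowest_fleet_num_py := by
  intro fleets _ _
  unfold Spec_get_lowest_fleet_num_py get_lowest_fleet_num_py get_lowest_fleet_num_py_alt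
  rw [pv_aLoop_eq]
  have hmap : (PySem.List.pyRange 0 10 1).map (· + 1) = PySem.List.pyRange 1 11 1 := by decide
  have hself : PySem.Set.ofList (PySem.List.pyRange 1 11 1) = PySem.List.pyRange 1 11 1 := by decide
  rw [hmap]
  simp only [PySem.Set.diff, hself]
  rw [pv_min?_sorted _ (List.Pairwise.filter _ (PySem.List.pairwise_lt_pyRange_one 1 11))]
  congr 2
  apply List.filter_congr
  intro r _
  congr 1
  simp [PySem.Set.contains_eq_listContains, PySem.Set.mem_ofList]
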